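-- pv_equiv track=rewrite | github.com/LordHayne/LexiAI | backend/services/home_assistant.py | _select_entity
-- ===== SOURCE A (Python) =====
-- from typing import Dict, Any, Optional, List
--
-- def _select_entity(
--
--     candidates: List[str],
--     domain: Optional[str],
--     preferred_domains: Optional[List[str]]
-- ) -> Optional[str]:
--     """Pick best entity based on domain filters and preferences."""
--     if not candidates:
--         return None
--
--     if domain:
--         for candidate in candidates:
--             if candidate.startswith(f"{domain}."):
--                 return candidate
--         return None
--
--     if preferred_domains:
--         for pref_domain in preferred_domains:
--             for candidate in candidates:
--                 if candidate.startswith(f"{pref_domain}."):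
--                     return candidate
--
--     return candidates[0]
-- ===== SOURCE B (Python) =====
-- from typing import Optional, List
--
-- def _select_entity(
--     candidates: List[str],
--     domain: Optional[str],
--     preferred_domains: Optional[List[str]]
-- ) -> Optional[str]:
--     """Pick best entity based on domain filters and preferences."""
--     if not candidates:
--         return None
--
--     if domain:
--         prefix = domain + "."
--         return next((c for c in candidates if c.startswith(prefix)), None)
--
--     # Loop interchange: one pass over candidates, keeping the candidate whose
--     # first matching preferred domain has the lowest rank (earliest candidate
--     # wins ties), instead of rescanning all candidates per preferred domain.
--     best_rank = None
--     best_cand = None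
--     for c in candidates:
--         for rank, p in enumerate(preferred_domains or []):
--             if c.startswith(p + "."):
--                 if best_rank is None or rank < best_rank:
--                     best_rank, best_cand = rank, c
--                 break
--
--     return best_cand if best_cand is not None else candidates[0]
-- ===== Notes on version B (the rewrite author's own statement) =====
-- stated objective: alternative
-- what changed: Interchanges the loop nesting: one pass over candidates keeps a running best (lowest preferred-domain rank, earliest candidate wins ties) instead of A's full candidate scan per preferred domain.
import Mathlib
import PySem

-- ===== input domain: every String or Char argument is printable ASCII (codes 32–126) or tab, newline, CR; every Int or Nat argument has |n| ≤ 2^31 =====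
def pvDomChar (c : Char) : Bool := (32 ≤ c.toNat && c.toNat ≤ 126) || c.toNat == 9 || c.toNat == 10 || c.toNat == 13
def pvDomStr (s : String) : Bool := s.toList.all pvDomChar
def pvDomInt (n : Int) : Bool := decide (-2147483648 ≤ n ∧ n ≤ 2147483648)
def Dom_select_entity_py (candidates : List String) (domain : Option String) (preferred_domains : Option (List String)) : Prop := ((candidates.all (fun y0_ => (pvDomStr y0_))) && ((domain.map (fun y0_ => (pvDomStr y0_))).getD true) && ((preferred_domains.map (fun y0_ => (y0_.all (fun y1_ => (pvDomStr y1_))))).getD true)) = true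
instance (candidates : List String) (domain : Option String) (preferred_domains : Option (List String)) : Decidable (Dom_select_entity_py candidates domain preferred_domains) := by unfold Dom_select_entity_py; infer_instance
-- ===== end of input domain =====

-- B interchanges A's loop nesting: one pass over candidates tracking the match with
-- the lowest preferred-domain rank (earliest candidate wins ties); same return value.

-- ===== PORT A =====

-- A's inner scan: first candidate starting with `pre` (pre = f"{domain}.")
def selA_scan (pre : String) : List String → Option String
  | [] => none
  | c :: rest => if PySem.Str.startswith c pre then some c else selA_scan pre rest

-- A's nested loops over preferred_domains
def selA_prefs (candidates : List String) : List String → Option String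
  | [] => none
  | p :: rest =>
      match selA_scan (p ++ ".") candidates with
      | some c => some c
      | none => selA_prefs candidates rest

def select_entity_py (candidates : List String) (domain : Option String) (preferred_domains : Option (List String)) : Option String :=
  if candidates = [] then none
  else
    match domain with
    | some d =>
        if d ≠ "" then selA_scan (d ++ ".") candidates
        else
          match preferred_domains with
          | some prefs =>
              if prefs ≠ [] then
                match selA_prefs candidates prefs with
                | some c => some c
                | none => candidates.head?
              else candidates.head?
          | none => candidates.head?
    | none =>
        match preferred_domains with
        | some prefs =>
            if prefs ≠ [] then
              match selA_prefs candidates prefs with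
              | some c => some c
              | none => candidates.head?
            else candidates.head?
        | none => candidates.head?

-- ===== PORT B =====

-- Source B's inner loop with break: rank of the first preferred domain matching c
def selB_rank (c : String) (rank : Nat) : List String → Option Nat
  | [] => none
  | p :: rest =>
      if PySem.Str.startswith c (p ++ ".") then some rank else selB_rank c (rank + 1) rest

-- running-best update: `if best_rank is None or rank < best_rank: ...` (no-op when no match)
def selB_upd (best : Option (Nat × String)) (c : String) (i : Option Nat) : Option (Nat × String) :=
  match i with
  | none => best
  | some r =>
      match best with
      | none => some (r, c)
      | some (br, bc) => if r < br then some (r, c) else some (br, bc)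

-- Source B's single pass over candidates
def selB_loop (prefs : List String) (best : Option (Nat × String)) : List String → Option (Nat × String)
  | [] => best
  | c :: rest => selB_loop prefs (selB_upd best c (selB_rank c 0 prefs)) rest

-- `return best_cand if best_cand is not None else candidates[0]`
def selB_prefPhase (candidates : List String) (prefs : List String) (c0 : String) : Option String :=
  match selB_loop prefs none candidates with
  | some (_, bc) => some bc
  | none => some c0

def select_entity_py_alt (candidates : List String) (domain : Option String) (preferred_domains : Option (List String)) : Option String :=
  match candidates with
  | [] => none
  | c0 :: _ =>
      match domain with
      | some d =>
          if d ≠ "" then candidates.find? (fun c => PySem.Str.startswith c (d ++ "."))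
          else selB_prefPhase candidates (preferred_domains.getD []) c0
      | none => selB_prefPhase candidates (preferred_domains.getD []) c0

-- ===== PRECONDITION & SPEC =====
def Spec_select_entity_py (candidates : List String) (domain : Option String) (preferred_domains : Option (List String)) (out : Option String) : Prop := out = select_entity_py_alt candidates domain preferred_domains
instance (candidates : List String) (domain : Option String) (preferred_domains : Option (List String)) (out : Option String) : Decidable (Spec_select_entity_py candidates domain preferred_domains out) := by unfold Spec_select_entity_py; infer_instance

-- ===== CLAIM =====
def Claim_equal_select_entity_py : Prop := ∀ (candidates : List String) (domain : Option String) (preferred_domains : Option (List String)), Dom_select_entity_py candidates domain preferred_domains → Spec_select_entity_py candidates domain preferred_domains (select_entity_py candidates domain preferred_domains)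

-- ===== LEMMAS AND PROOFS =====

theorem find?_eq_selA_scan (pre : String) (l : List String) :
    l.find? (fun c => PySem.Str.startswith c pre) = selA_scan pre l := by
  induction l with
  | nil => rfl
  | cons c rest ih =>
      rw [selA_scan]
      cases h : PySem.Str.startswith c pre <;>
        simp only [List.find?_cons, h, Bool.false_eq_true, if_true, if_false, ih]

-- left-biased min by rank, used only in proofs
def pvMerge : Option (Nat × String) → Option (Nat × String) → Option (Nat × String)
  | none, y => y
  | some b, none => some b
  | some b, some x => if x.1 < b.1 then some x else some b

theorem pvMerge_upd_case (r br r2 : Nat) (c bc c2 : String) :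
    pvMerge (if r < br then some (r, c) else some (br, bc)) (some (r2, c2)) =
    pvMerge (some (br, bc)) (pvMerge (some (r, c)) (some (r2, c2))) := by
  simp only [pvMerge]
  split_ifs <;> simp only [pvMerge] <;> split_ifs <;> first | rfl | omega

theorem selB_loop_merge (prefs : List String) (cs : List String) :
    ∀ best, selB_loop prefs best cs = pvMerge best (selB_loop prefs none cs) := by
  induction cs with
  | nil => intro best; cases best <;> rfl
  | cons c rest ih =>
      intro best
      rw [selB_loop, selB_loop, ih, ih (selB_upd none c (selB_rank c 0 prefs))]
      cases i : selB_rank c 0 prefs with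
      | none => cases best <;> rfl
      | some r =>
          cases best with
          | none => rfl
          | some b =>
              rcases b with ⟨br, bc⟩
              cases g : selB_loop prefs none rest with
              | none =>
                  simp only [selB_upd, pvMerge]
                  split_ifs <;> rfl
              | some x =>
                  rcases x with ⟨r2, c2⟩
                  simp only [selB_upd]
                  exact pvMerge_upd_case r br r2 c bc c2

theorem selB_rank_shift (c : String) (qs : List String) :
    ∀ k, selB_rank c k qs = (selB_rank c 0 qs).map (· + k) := by
  induction qs with
  | nil => intro k; rfl
  | cons q rest ih =>
      intro k
      rw [selB_rank, selB_rank]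
      cases h : PySem.Str.startswith c (q ++ ".")
      · simp only [Bool.false_eq_true, if_false]
        rw [ih (k + 1), ih 1, Option.map_map]
        cases selB_rank c 0 rest <;> simp <;> omega
      · simp

theorem selB_loop_nil_prefs (cs : List String) : ∀ best, selB_loop [] best cs = best := by
  induction cs with
  | nil => intro best; rfl
  | cons c rest ih => intro best; rw [selB_loop]; exact ih _

theorem selA_scan_none (pre : String) (cs : List String) (h : selA_scan pre cs = none) :
    ∀ c ∈ cs, PySem.Str.startswith c pre = false := by
  induction cs with
  | nil => simp
  | cons c rest ih =>
      rw [selA_scan] at h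
      cases hc : PySem.Str.startswith c pre
      · rw [hc] at h; simp only [Bool.false_eq_true, if_false] at h
        intro x hx
        rcases List.mem_cons.mp hx with rfl | hx
        · exact hc
        · exact ih h x hx
      · rw [hc] at h; simp at h

-- shift an optional (rank, cand) pair by one rank
def pvShift : Option (Nat × String) → Option (Nat × String)
  | none => none
  | some x => some (x.1 + 1, x.2)

theorem pvMerge_shift (a b : Option (Nat × String)) :
    pvMerge (pvShift a) (pvShift b) = pvShift (pvMerge a b) := by
  cases a with
  | none => cases b <;> rfl
  | some x =>
      cases b with
      | none => rfl
      | some y =>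
          simp only [pvShift, pvMerge]
          split_ifs <;> simp_all

theorem selB_loop_shift (p : String) (rest : List String) (cs : List String)
    (h : ∀ c ∈ cs, PySem.Str.startswith c (p ++ ".") = false) :
    selB_loop (p :: rest) none cs = pvShift (selB_loop rest none cs) := by
  induction cs with
  | nil => rfl
  | cons c cs' ih =>
      have hc : PySem.Str.startswith c (p ++ ".") = false := h c (List.mem_cons_self ..)
      have hrank : selB_rank c 0 (p :: rest) = (selB_rank c 0 rest).map (· + 1) := by
        rw [selB_rank, hc]; simp only [Bool.false_eq_true, if_false]
        exact selB_rank_shift c rest 1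
      have hupd : selB_upd none c (selB_rank c 0 (p :: rest)) =
          pvShift (selB_upd none c (selB_rank c 0 rest)) := by
        rw [hrank]; cases selB_rank c 0 rest <;> rfl
      rw [selB_loop, selB_loop_merge, hupd, ih (fun x hx => h x (List.mem_cons_of_mem _ hx)),
        pvMerge_shift, selB_loop,
        selB_loop_merge rest cs' (selB_upd none c (selB_rank c 0 rest))]

theorem pvMerge_zero (x : String) (y : Option (Nat × String)) :
    pvMerge (some (0, x)) y = some (0, x) := by
  cases y with
  | none => rfl
  | some z => simp [pvMerge]

theorem selB_loop_zero (p : String) (rest : List String) (cs : List String) (c : String)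
    (h : selA_scan (p ++ ".") cs = some c) :
    selB_loop (p :: rest) none cs = some (0, c) := by
  induction cs with
  | nil => simp [selA_scan] at h
  | cons c1 cs' ih =>
      rw [selA_scan] at h
      cases hc : PySem.Str.startswith c1 (p ++ ".")
      · rw [hc] at h; simp only [Bool.false_eq_true, if_false] at h
        have hrank : selB_rank c1 0 (p :: rest) = (selB_rank c1 0 rest).map (· + 1) := by
          rw [selB_rank, hc]; simp only [Bool.false_eq_true, if_false]
          exact selB_rank_shift c1 rest 1
        rw [selB_loop, selB_loop_merge, ih h, hrank]
        cases selB_rank c1 0 rest with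
        | none => rfl
        | some r => simp [selB_upd, pvMerge]
      · rw [hc] at h; simp only [if_true] at h
        injection h with h; subst h
        rw [selB_loop, selB_loop_merge]
        have : selB_rank c1 0 (p :: rest) = some 0 := by rw [selB_rank, hc]; rfl
        rw [this]
        exact pvMerge_zero _ _

theorem pvShift_map_snd (x : Option (Nat × String)) :
    (pvShift x).map Prod.snd = x.map Prod.snd := by
  cases x <;> rfl

theorem selB_loop_snd_eq_selA_prefs (prefs : List String) (cs : List String) :
    (selB_loop prefs none cs).map Prod.snd = selA_prefs cs prefs := by
  induction prefs with
  | nil => rw [selB_loop_nil_prefs]; rfl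
  | cons p rest ih =>
      rw [selA_prefs]
      cases h : selA_scan (p ++ ".") cs with
      | none =>
          rw [selB_loop_shift p rest cs (selA_scan_none _ _ h), pvShift_map_snd, ih]
      | some c =>
          rw [selB_loop_zero p rest cs c h]; rfl

theorem selB_prefPhase_eq (cs prefs : List String) (c0 : String) :
    selB_prefPhase cs prefs c0 =
      match selA_prefs cs prefs with
      | some c => some c
      | none => some c0 := by
  unfold selB_prefPhase
  have h := selB_loop_snd_eq_selA_prefs prefs cs
  cases g : selB_loop prefs none cs with
  | none => rw [g] at h; simp only [Option.map_none] at h; rw [← h]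
  | some x => rw [g] at h; simp only [Option.map_some] at h; rw [← h]

-- ===== VERDICT =====
theorem select_entity_py_spec : Claim_equal_select_entity_py := by
  intro candidates domain preferred_domains _
  unfold Spec_select_entity_py
  cases candidates with
  | nil => cases domain <;> cases preferred_domains <;> rfl
  | cons c0 cs =>
      unfold select_entity_py select_entity_py_alt
      simp only [reduceCtorEq, if_false]
      have hpref : ∀ prefsOpt : Option (List String),
          (match prefsOpt with
            | some prefs =>
                if prefs ≠ [] then
                  match selA_prefs (c0 :: cs) prefs with
                  | some c => some c
                  | none => (c0 :: cs).head?
                else (c0 :: cs).head?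
            | none => (c0 :: cs).head?) =
          selB_prefPhase (c0 :: cs) (prefsOpt.getD []) c0 := by
        intro prefsOpt
        cases prefsOpt with
        | none => rw [selB_prefPhase_eq]; rfl
        | some prefs =>
            cases prefs with
            | nil => rw [selB_prefPhase_eq]; rfl
            | cons p ps =>
                simp only [ne_eq, reduceCtorEq, not_false_eq_true, if_true]
                rw [selB_prefPhase_eq, Option.getD_some]
                cases selA_prefs (c0 :: cs) (p :: ps) <;> rfl
      cases domain with
      | none => exact hpref preferred_domains
      | some d =>
          by_cases hd : d = ""
          · subst hd
            simp only [ne_eq, not_true_eq_false, if_false]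
            exact hpref preferred_domains
          · simp only [ne_eq, hd, not_false_eq_true, if_true]
            rw [find?_eq_selA_scan]
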